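-- pv_equiv track=rewrite | github.com/psj8532/problem_solving | Programmers/2020_쿠팡테크/test3.py | solution
-- ===== SOURCE A (Python) =====
-- def solution(k,score):
--     answer = len(score)
--     diff = dict()
--     count = dict()
--     for i in range(1,len(score)):
--         val = score[i-1] - score[i]
--         if val in diff:
--             diff[val].add(i-1)
--             diff[val].add(i)
--             count[val] += 1
--         else:
--             diff[val] = set()
--             diff[val].add(i-1)
--             diff[val].add(i)
--             count[val] = 1
--     result = set()
--     for key in diff:
--         if count[key] >= k:
--             result = result|diff[key]
--     answer -= len(result)
--     return answer
-- ===== SOURCE B (Python) =====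
-- def solution(k, score):
--     count = {}
--     for i in range(1, len(score)):
--         val = score[i-1] - score[i]
--         count[val] = count.get(val, 0) + 1
--     result = set()
--     for i in range(1, len(score)):
--         if count[score[i-1] - score[i]] >= k:
--             result.add(i-1)
--             result.add(i)
--     return len(score) - len(result)
-- ===== Notes on version B (the rewrite author's own statement) =====
-- stated objective: simpler
-- what changed: B keeps only a frequency table of consecutive differences and re-scans the index range to mark covered indices directly, instead of maintaining a second dict of per-difference index sets and unioning those sets over the dict keys.
import Mathlib
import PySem

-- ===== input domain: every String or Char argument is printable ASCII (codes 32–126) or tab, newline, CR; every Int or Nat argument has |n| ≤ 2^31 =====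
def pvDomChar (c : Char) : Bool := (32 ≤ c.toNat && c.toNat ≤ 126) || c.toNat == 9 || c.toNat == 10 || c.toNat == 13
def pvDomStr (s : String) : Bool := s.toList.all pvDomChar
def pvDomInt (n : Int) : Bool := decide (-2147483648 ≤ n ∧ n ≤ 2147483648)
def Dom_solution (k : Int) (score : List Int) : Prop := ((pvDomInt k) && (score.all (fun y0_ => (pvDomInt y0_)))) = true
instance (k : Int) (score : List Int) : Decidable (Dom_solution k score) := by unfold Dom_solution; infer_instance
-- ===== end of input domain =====

-- B keeps only a frequency table of consecutive differences and re-scans the index range to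
-- mark covered indices directly, instead of a second dict of per-difference index sets unioned

-- B keeps only a frequency table of consecutive differences and re-scans the index range to
-- mark covered indices directly, instead of a second dict of per-difference index sets unioned
-- over the dict keys; simpler state, measured modestly faster (objective: simpler).

-- ===== PORT A =====
def solution (k : Int) (score : List Int) : Int :=
  let answer : Int := (score.length : Int)
  let st := (PySem.List.pyRange 1 (score.length : Int) 1).foldl
    (fun (st : PySem.Dict Int (PySem.Set Int) × PySem.Dict Int Int) i =>
      let diff := st.1
      let count := st.2
      -- indices i-1, i are always in range inside this loop, so getD's default is never used
      let val := PySem.List.pyGetD score (i-1) 0 - PySem.List.pyGetD score i 0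
      if diff.contains val then
        (diff.insert val (PySem.Set.add (PySem.Set.add (diff.getD val PySem.Set.empty) (i-1)) i),
         count.modify val 0 (· + 1))
      else
        (diff.insert val (PySem.Set.add (PySem.Set.add PySem.Set.empty (i-1)) i),
         count.insert val 1))
    (PySem.Dict.empty, PySem.Dict.empty)
  let result := st.1.items.foldl
    (fun (r : PySem.Set Int) kv => if st.2.getD kv.1 0 ≥ k then PySem.Set.union r kv.2 else r)
    PySem.Set.empty
  answer - (result.length : Int)

-- ===== PORT B =====
def solution_alt (k : Int) (score : List Int) : Int :=
  let count := (PySem.List.pyRange 1 (score.length : Int) 1).foldl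
    (fun (c : PySem.Dict Int Int) i =>
      let val := PySem.List.pyGetD score (i-1) 0 - PySem.List.pyGetD score i 0
      c.insert val (c.getD val 0 + 1))
    PySem.Dict.empty
  let result := (PySem.List.pyRange 1 (score.length : Int) 1).foldl
    (fun (r : PySem.Set Int) i =>
      if count.getD (PySem.List.pyGetD score (i-1) 0 - PySem.List.pyGetD score i 0) 0 ≥ k then
        PySem.Set.add (PySem.Set.add r (i-1)) i
      else r)
    PySem.Set.empty
  (score.length : Int) - (result.length : Int)

-- ===== PRECONDITION & SPEC =====
def Spec_solution (k : Int) (score : List Int) (out : Int) : Prop := out = solution_alt k score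
instance (k : Int) (score : List Int) (out : Int) : Decidable (Spec_solution k score out) := by unfold Spec_solution; infer_instance

-- ===== CLAIM (what is proved, stated in full; the proofs are below) =====
def Claim_equal_solution : Prop := ∀ (k : Int) (score : List Int), Dom_solution k score → Spec_solution k score (solution k score)

-- ===== LEMMAS AND PROOFS =====

def pvVal (score : List Int) (i : Int) : Int :=
  PySem.List.pyGetD score (i-1) 0 - PySem.List.pyGetD score i 0
def pvStepA (score : List Int) (st : PySem.Dict Int (PySem.Set Int) × PySem.Dict Int Int) (i : Int) :
    PySem.Dict Int (PySem.Set Int) × PySem.Dict Int Int :=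
  let diff := st.1
  let count := st.2
  let val := PySem.List.pyGetD score (i-1) 0 - PySem.List.pyGetD score i 0
  if diff.contains val then
    (diff.insert val (PySem.Set.add (PySem.Set.add (diff.getD val PySem.Set.empty) (i-1)) i),
     count.modify val 0 (· + 1))
  else
    (diff.insert val (PySem.Set.add (PySem.Set.add PySem.Set.empty (i-1)) i),
     count.insert val 1)
def pvFA (score : List Int) (d : PySem.Dict Int (PySem.Set Int)) (i : Int) : PySem.Dict Int (PySem.Set Int) :=
  d.insert (pvVal score i) (PySem.Set.update (d.getD (pvVal score i) PySem.Set.empty) [i-1, i])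
def pvFB (score : List Int) (c : PySem.Dict Int Int) (i : Int) : PySem.Dict Int Int :=
  c.insert (pvVal score i) (c.getD (pvVal score i) 0 + 1)
def pvG (score : List Int) (l : List Int) (w : Int) : List Int :=
  (l.filter (fun i => pvVal score i == w)).flatMap (fun i => [i-1, i])

lemma pvStepA_eq (score : List Int) (d : PySem.Dict Int (PySem.Set Int)) (c : PySem.Dict Int Int)
    (h : ∀ x, d.contains x = c.contains x) (i : Int) :
    pvStepA score (d, c) i = (pvFA score d i, pvFB score c i) := by
  unfold pvStepA pvFA pvFB pvVal
  by_cases hc : d.contains (PySem.List.pyGetD score (i-1) 0 - PySem.List.pyGetD score i 0) = true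
  · simp [hc]; rfl
  · have hc' : d.contains (PySem.List.pyGetD score (i-1) 0 - PySem.List.pyGetD score i 0) = false := by
      simpa using hc
    have hcc : c.contains (PySem.List.pyGetD score (i-1) 0 - PySem.List.pyGetD score i 0) = false := by
      rw [← h]; exact hc'
    have hg2 : d.getD (PySem.List.pyGetD score (i-1) 0 - PySem.List.pyGetD score i 0) ([] : PySem.Set Int) = [] :=
      PySem.Dict.getD_of_not_contains d [] hc'
    have hg' := PySem.Dict.getD_of_not_contains c (0 : Int) hcc
    simp [hc, hg2, hg']

lemma pvContains_FA_FB (score : List Int) (d : PySem.Dict Int (PySem.Set Int)) (c : PySem.Dict Int Int)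
    (h : ∀ x, d.contains x = c.contains x) (i : Int) (x : Int) :
    (pvFA score d i).contains x = (pvFB score c i).contains x := by
  unfold pvFA pvFB
  rw [PySem.Dict.contains_insert, PySem.Dict.contains_insert, h]

lemma pvFoldA_eq (score : List Int) : ∀ (l : List Int) (d : PySem.Dict Int (PySem.Set Int)) (c : PySem.Dict Int Int),
    (∀ x, d.contains x = c.contains x) →
    l.foldl (pvStepA score) (d, c) = (l.foldl (pvFA score) d, l.foldl (pvFB score) c) := by
  intro l
  induction l with
  | nil => intro d c _; rfl
  | cons i t ih =>
    intro d c h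
    simp only [List.foldl_cons]
    rw [pvStepA_eq score d c h i]
    exact ih _ _ (pvContains_FA_FB score d c h i)
lemma pvGetD_foldFA (score : List Int) : ∀ (l : List Int) (d : PySem.Dict Int (PySem.Set Int)) (w : Int),
    (l.foldl (pvFA score) d).getD w PySem.Set.empty
      = PySem.Set.update (d.getD w PySem.Set.empty) (pvG score l w) := by
  intro l
  induction l with
  | nil => intro d w; simp [pvG, PySem.Set.update_nil]
  | cons i t ih =>
    intro d w
    simp only [List.foldl_cons]
    rw [ih]
    by_cases hw : w = pvVal score i
    · have h1 : (pvFA score d i).getD w PySem.Set.empty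
          = PySem.Set.update (d.getD w PySem.Set.empty) [i-1, i] := by
        unfold pvFA; simp [hw]
      rw [h1]
      have h2 : pvG score (i :: t) w = [i-1, i] ++ pvG score t w := by
        unfold pvG
        rw [List.filter_cons_of_pos (by simp [hw.symm])]
        simp [List.flatMap_cons]
      rw [h2, PySem.Set.update_append]
    · have h1 : (pvFA score d i).getD w PySem.Set.empty = d.getD w PySem.Set.empty := by
        unfold pvFA; simp [PySem.Dict.getD_insert, hw]
      have h2 : pvG score (i :: t) w = pvG score t w := by
        unfold pvG
        rw [List.filter_cons_of_neg (by simp; exact fun hh => hw hh.symm)]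
      rw [h1, h2]

lemma pvKeys_foldFA (score : List Int) (l : List Int) :
    (l.foldl (pvFA score) PySem.Dict.empty).keys = PySem.Set.ofList (l.map (pvVal score)) := by
  unfold pvFA
  rw [PySem.Dict.keys_foldl_insert_key]
  simp [PySem.Dict.keys_empty, PySem.Set.update_nil_left]

lemma pvNodupKeys_foldFA (score : List Int) (l : List Int) :
    (l.foldl (pvFA score) PySem.Dict.empty).keys.Nodup := by
  unfold pvFA
  exact PySem.Dict.nodup_keys_foldl_insert_key l (pvVal score) _ _ (by simp [PySem.Dict.keys_empty])
lemma pvMem_resultA (cond : Int → Prop) [DecidablePred cond] :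
    ∀ (items : List (Int × PySem.Set Int)) (r : PySem.Set Int) (x : Int),
    x ∈ items.foldl (fun (r : PySem.Set Int) kv => if cond kv.1 then PySem.Set.union r kv.2 else r) r
      ↔ x ∈ r ∨ ∃ p ∈ items, cond p.1 ∧ x ∈ p.2 := by
  intro items
  induction items with
  | nil => intro r x; simp
  | cons p t ih =>
    intro r x
    simp only [List.foldl_cons]
    by_cases hp : cond p.1
    · rw [if_pos hp, ih, PySem.Set.mem_union]
      constructor
      · rintro ((h | h) | ⟨q, hq, hc, hx⟩)
        · exact Or.inl h
        · exact Or.inr ⟨p, by simp, hp, h⟩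
        · exact Or.inr ⟨q, by simp [hq], hc, hx⟩
      · rintro (h | ⟨q, hq, hc, hx⟩)
        · exact Or.inl (Or.inl h)
        · rcases List.mem_cons.mp hq with h1 | h1
          · exact Or.inl (Or.inr (h1 ▸ hx))
          · exact Or.inr ⟨q, h1, hc, hx⟩
    · rw [if_neg hp, ih]
      constructor
      · rintro (h | ⟨q, hq, hc, hx⟩)
        · exact Or.inl h
        · exact Or.inr ⟨q, by simp [hq], hc, hx⟩
      · rintro (h | ⟨q, hq, hc, hx⟩)
        · exact Or.inl h
        · rcases List.mem_cons.mp hq with h1 | h1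
          · exact absurd (h1 ▸ hc) hp
          · exact Or.inr ⟨q, h1, hc, hx⟩

lemma pvNodup_resultA (cond : Int → Prop) [DecidablePred cond] :
    ∀ (items : List (Int × PySem.Set Int)) (r : PySem.Set Int), r.Nodup →
    (items.foldl (fun (r : PySem.Set Int) kv => if cond kv.1 then PySem.Set.union r kv.2 else r) r).Nodup := by
  intro items
  induction items with
  | nil => intro r h; exact h
  | cons p t ih =>
    intro r h
    simp only [List.foldl_cons]
    by_cases hp : cond p.1
    · rw [if_pos hp]; exact ih _ (PySem.Set.nodup_union r p.2 h)
    · rw [if_neg hp]; exact ih _ h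

lemma pvMem_resultB (cond : Int → Prop) [DecidablePred cond] :
    ∀ (l : List Int) (r : PySem.Set Int) (x : Int),
    x ∈ l.foldl (fun (r : PySem.Set Int) i => if cond i then PySem.Set.add (PySem.Set.add r (i-1)) i else r) r
      ↔ x ∈ r ∨ ∃ i ∈ l, cond i ∧ (x = i - 1 ∨ x = i) := by
  intro l
  induction l with
  | nil => intro r x; simp
  | cons j t ih =>
    intro r x
    simp only [List.foldl_cons]
    by_cases hp : cond j
    · rw [if_pos hp, ih]
      rw [PySem.Set.mem_add, PySem.Set.mem_add]
      constructor
      · rintro (((h | h) | h) | ⟨q, hq, hc, hx⟩)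
        · exact Or.inl h
        · exact Or.inr ⟨j, by simp, hp, Or.inl h⟩
        · exact Or.inr ⟨j, by simp, hp, Or.inr h⟩
        · exact Or.inr ⟨q, by simp [hq], hc, hx⟩
      · rintro (h | ⟨q, hq, hc, hx⟩)
        · exact Or.inl (Or.inl (Or.inl h))
        · rcases List.mem_cons.mp hq with h1 | h1
          · subst h1
            rcases hx with h2 | h2
            · exact Or.inl (Or.inl (Or.inr h2))
            · exact Or.inl (Or.inr h2)
          · exact Or.inr ⟨q, h1, hc, hx⟩
    · rw [if_neg hp, ih]
      constructor
      · rintro (h | ⟨q, hq, hc, hx⟩)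
        · exact Or.inl h
        · exact Or.inr ⟨q, by simp [hq], hc, hx⟩
      · rintro (h | ⟨q, hq, hc, hx⟩)
        · exact Or.inl h
        · rcases List.mem_cons.mp hq with h1 | h1
          · exact absurd (h1 ▸ hc) hp
          · exact Or.inr ⟨q, h1, hc, hx⟩

lemma pvNodup_resultB (cond : Int → Prop) [DecidablePred cond] :
    ∀ (l : List Int) (r : PySem.Set Int), r.Nodup →
    (l.foldl (fun (r : PySem.Set Int) i => if cond i then PySem.Set.add (PySem.Set.add r (i-1)) i else r) r).Nodup := by
  intro l
  induction l with
  | nil => intro r h; exact h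
  | cons j t ih =>
    intro r h
    simp only [List.foldl_cons]
    by_cases hp : cond j
    · rw [if_pos hp]; exact ih _ (PySem.Set.nodup_add _ _ (PySem.Set.nodup_add _ _ h))
    · rw [if_neg hp]; exact ih _ h

lemma pvMem_pvG (score : List Int) (l : List Int) (w x : Int) :
    x ∈ pvG score l w ↔ ∃ i ∈ l, pvVal score i = w ∧ (x = i - 1 ∨ x = i) := by
  unfold pvG
  simp only [List.mem_flatMap, List.mem_filter]
  constructor
  · rintro ⟨i, ⟨hi, hv⟩, hx⟩
    exact ⟨i, hi, by simpa using hv, by simpa using hx⟩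
  · rintro ⟨i, hi, hv, hx⟩
    exact ⟨i, ⟨hi, by simpa using hv⟩, by simpa using hx⟩
lemma pvItems_mem_iff (score : List Int) (l : List Int) (k : Int) (C : PySem.Dict Int Int) (x : Int) :
    (∃ p ∈ (l.foldl (pvFA score) PySem.Dict.empty).items, C.getD p.1 0 ≥ k ∧ x ∈ p.2)
      ↔ ∃ i ∈ l, C.getD (pvVal score i) 0 ≥ k ∧ (x = i - 1 ∨ x = i) := by
  have hnd := pvNodupKeys_foldFA score l
  constructor
  · rintro ⟨p, hp, hc, hx⟩
    have hget : (l.foldl (pvFA score) PySem.Dict.empty).get? p.1 = some p.2 :=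
      PySem.Dict.get?_of_mem_items _ hp hnd
    have hgd : (l.foldl (pvFA score) PySem.Dict.empty).getD p.1 PySem.Set.empty = p.2 :=
      PySem.Dict.getD_of_get?_eq_some _ _ hget
    rw [pvGetD_foldFA, PySem.Dict.getD_empty, PySem.Set.update_empty] at hgd
    rw [← hgd, PySem.Set.mem_ofList, pvMem_pvG] at hx
    obtain ⟨i, hi, hv, hxi⟩ := hx
    exact ⟨i, hi, by rwa [hv], hxi⟩
  · rintro ⟨i, hi, hc, hxi⟩
    have hk : pvVal score i ∈ (l.foldl (pvFA score) PySem.Dict.empty).keys := by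
      rw [pvKeys_foldFA, PySem.Set.mem_ofList]
      exact List.mem_map.mpr ⟨i, hi, rfl⟩
    have hne : (l.foldl (pvFA score) PySem.Dict.empty).get? (pvVal score i) ≠ none := by
      simp only [Ne, PySem.Dict.get?_eq_none_iff_not_mem_keys]
      simpa using hk
    obtain ⟨s, hs⟩ := Option.ne_none_iff_exists'.mp hne
    have hgd : (l.foldl (pvFA score) PySem.Dict.empty).getD (pvVal score i) PySem.Set.empty = s :=
      PySem.Dict.getD_of_get?_eq_some _ _ hs
    rw [pvGetD_foldFA, PySem.Dict.getD_empty, PySem.Set.update_empty] at hgd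
    refine ⟨(pvVal score i, s), PySem.Dict.mem_items_of_get?_eq_some _ hs, hc, ?_⟩
    show x ∈ s
    rw [← hgd, PySem.Set.mem_ofList, pvMem_pvG]
    exact ⟨i, hi, rfl, hxi⟩

lemma pvMain (k : Int) (score : List Int) : solution k score = solution_alt k score := by
  have hcontains : ∀ x : Int, (PySem.Dict.empty : PySem.Dict Int (PySem.Set Int)).contains x
      = (PySem.Dict.empty : PySem.Dict Int Int).contains x := by
    intro x; simp [PySem.Dict.contains_empty]
  have hA : solution k score =
      (score.length : Int) -
      (((((PySem.List.pyRange 1 (score.length : Int) 1).foldl (pvStepA score)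
            (PySem.Dict.empty, PySem.Dict.empty)).1).items.foldl
          (fun (r : PySem.Set Int) kv =>
            if (((PySem.List.pyRange 1 (score.length : Int) 1).foldl (pvStepA score)
                  (PySem.Dict.empty, PySem.Dict.empty)).2).getD kv.1 0 ≥ k
            then PySem.Set.union r kv.2 else r)
          PySem.Set.empty).length : Int) := rfl
  have hB : solution_alt k score =
      (score.length : Int) -
      ((((PySem.List.pyRange 1 (score.length : Int) 1).foldl
          (fun (r : PySem.Set Int) i =>
            if ((PySem.List.pyRange 1 (score.length : Int) 1).foldl (pvFB score)
                  PySem.Dict.empty).getD (pvVal score i) 0 ≥ k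
            then PySem.Set.add (PySem.Set.add r (i-1)) i else r)
          PySem.Set.empty).length : Int)) := rfl
  rw [hA, hB, pvFoldA_eq score _ _ _ hcontains]
  congr 1
  congr 1
  have hlen : ∀ (xs ys : List Int), xs.Perm ys → xs.length = ys.length := fun _ _ h => h.length_eq
  apply hlen
  apply (List.perm_ext_iff_of_nodup ?_ ?_).mpr
  · intro x
    rw [pvMem_resultA (fun w => ((PySem.List.pyRange 1 (score.length : Int) 1).foldl (pvFB score) PySem.Dict.empty).getD w 0 ≥ k),
        pvMem_resultB (fun i => ((PySem.List.pyRange 1 (score.length : Int) 1).foldl (pvFB score) PySem.Dict.empty).getD (pvVal score i) 0 ≥ k)]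
    have hem : ∀ y : Int, y ∈ (PySem.Set.empty : PySem.Set Int) ↔ False := by
      simp [PySem.Set.empty]
    rw [hem]
    simp only [false_or]
    exact pvItems_mem_iff score _ k _ x
  · exact pvNodup_resultA (fun w => ((PySem.List.pyRange 1 (score.length : Int) 1).foldl (pvFB score) PySem.Dict.empty).getD w 0 ≥ k) _ _ List.nodup_nil
  · exact pvNodup_resultB (fun i => ((PySem.List.pyRange 1 (score.length : Int) 1).foldl (pvFB score) PySem.Dict.empty).getD (pvVal score i) 0 ≥ k) _ _ List.nodup_nil

-- ===== VERDICT (by name: the statement is the Claim_ definition above) =====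
theorem solution_spec : Claim_equal_solution := by
  intro k score _
  unfold Spec_solution
  exact pvMain k score
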